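-- pv_equiv track=rewrite | github.com/sachaheroux/interface_backend | johnson_modifie.py | cumulative_delay
-- ===== SOURCE A (Python) =====
-- def cumulative_delay(schedule, tasks, due_dates):
--     schedule_due_dates = [due_dates[i-1] for i in schedule]
--     m = [0]*len(tasks[0])
--     delays = []
--     for i, due_date in zip(schedule, schedule_due_dates):
--         for j in range(len(tasks[0])):
--             m[j] = max(m[j], m[j-1] if j > 0 else 0) + tasks[i-1][j]
--         delay = max(0, max(m) - due_date)
--         delays.append(delay)
--     return sum(delays)
-- ===== SOURCE B (Python) =====
-- def cumulative_delay(schedule, tasks, due_dates):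
--     # Column-major (machine-by-machine) DP instead of A's job-by-job rolling row:
--     # process one machine at a time across all scheduled jobs, keeping a per-job
--     # running maximum of completion times; tardiness is summed at the end.
--     n_m = len(tasks[0])
--     rows = [tasks[i - 1] for i in schedule]
--     col = []
--     best = []
--     for j in range(n_m):
--         new_col = []
--         prev = 0
--         for r, trow in enumerate(rows):
--             c = max(col[r] if j > 0 else 0, prev) + trow[j]
--             new_col.append(c)
--             prev = c
--         col = new_col
--         best = col[:] if j == 0 else [max(b, c) for b, c in zip(best, col)]
--     return sum(max(0, b - due_dates[i - 1]) for b, i in zip(best, schedule))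
-- ===== Notes on version B (the rewrite author's own statement) =====
-- stated objective: alternative
-- what changed: A fills the completion-time DP job-by-job (rolling machine row, taking each job's row max inline); B transposes the traversal to machine-by-machine columns over all jobs, maintaining a per-job running maximum across machines, and sums tardiness at the end.
import Mathlib
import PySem

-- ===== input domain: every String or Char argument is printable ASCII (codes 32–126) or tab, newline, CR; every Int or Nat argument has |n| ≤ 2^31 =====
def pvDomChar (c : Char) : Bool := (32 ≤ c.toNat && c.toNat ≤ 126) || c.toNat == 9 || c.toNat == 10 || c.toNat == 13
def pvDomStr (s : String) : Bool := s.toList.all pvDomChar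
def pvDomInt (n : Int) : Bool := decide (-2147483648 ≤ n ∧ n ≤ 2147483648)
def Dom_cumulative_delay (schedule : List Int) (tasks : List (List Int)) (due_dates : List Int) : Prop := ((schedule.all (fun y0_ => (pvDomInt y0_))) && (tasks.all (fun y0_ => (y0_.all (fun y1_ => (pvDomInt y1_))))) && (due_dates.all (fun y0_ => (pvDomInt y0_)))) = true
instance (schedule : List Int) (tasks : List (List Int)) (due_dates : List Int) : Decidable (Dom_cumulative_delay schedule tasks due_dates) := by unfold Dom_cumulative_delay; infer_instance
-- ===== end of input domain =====

-- B replaces A's job-by-job rolling-row DP (tardiness taken inline) by a transposed,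
-- machine-by-machine column DP with a per-job running maximum, summing tardiness at the end.


-- ===== PORT A =====
-- literal port of A: precompute schedule_due_dates, then one loop over zip(schedule, schedule_due_dates)
-- updating the rolling array m in place (List.set) and appending each delay to a list, summed at the end.
def cumulative_delay (schedule : List Int) (tasks : List (List Int)) (due_dates : List Int) : Int :=
  let schedule_due_dates := schedule.map (fun i => (PySem.List.pyGet? due_dates (i-1)).getD 0)
  let nm := ((PySem.List.pyGet? tasks 0).getD []).length
  let res := (schedule.zip schedule_due_dates).foldl
    (fun (st : List Int × List Int) p =>
      let m := (List.range nm).foldl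
        (fun acc j => acc.set j (max (acc.getD j 0) (if 0 < j then acc.getD (j-1) 0 else 0)
                          + (((PySem.List.pyGet? tasks (p.1-1)).getD []).getD j 0))) st.1
      let delay := max 0 ((PySem.List.max? m (fun x => x)).getD 0 - p.2)
      (m, st.2 ++ [delay]))
    (List.replicate nm 0, [])
  res.2.sum

-- ===== PORT B =====
-- one machine column: walk all job rows, index = p.1.length (enumerate), prev = completion of the
-- previous job on this machine, col = previous machine's column (used only when 0 < j)
def pvColStep (rows : List (List Int)) (col : List Int) (j : Nat) : List Int :=
  (rows.foldl (fun (p : List Int × Int) trow =>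
      let c := max (if 0 < j then col.getD p.1.length 0 else 0) p.2 + trow.getD j 0
      (p.1 ++ [c], c)) ([], 0)).1

def cumulative_delay_alt (schedule : List Int) (tasks : List (List Int)) (due_dates : List Int) : Int :=
  let nm := ((PySem.List.pyGet? tasks 0).getD []).length
  let rows := schedule.map (fun i => (PySem.List.pyGet? tasks (i-1)).getD [])
  let st := (List.range nm).foldl
    (fun (st : List Int × List Int) j =>
      let newcol := pvColStep rows st.1 j
      (newcol, if j = 0 then newcol else st.2.zipWith max newcol))
    ([], [])
  (st.2.zip schedule).foldl
    (fun t p => t + max 0 (p.1 - (PySem.List.pyGet? due_dates (p.2-1)).getD 0)) 0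

-- ===== PRECONDITION & SPEC =====
-- Pre_ excludes exactly the inputs on which Python A raises: tasks = [] (tasks[0] → IndexError),
-- a nonempty schedule with zero machines (max([]) → ValueError), and schedule entries whose
-- 1-based index leaves due_dates/tasks (IndexError) or whose task row is shorter than tasks[0].
def Pre_cumulative_delay (schedule : List Int) (tasks : List (List Int)) (due_dates : List Int) : Prop :=
  tasks ≠ [] ∧
  (schedule ≠ [] → ((PySem.List.pyGet? tasks 0).getD []).length ≠ 0) ∧
  ∀ i ∈ schedule, (PySem.List.pyGet? due_dates (i-1)).isSome ∧
    (PySem.List.pyGet? tasks (i-1)).isSome ∧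
    ((PySem.List.pyGet? tasks 0).getD []).length ≤ ((PySem.List.pyGet? tasks (i-1)).getD []).length
instance (schedule : List Int) (tasks : List (List Int)) (due_dates : List Int) : Decidable (Pre_cumulative_delay schedule tasks due_dates) := by unfold Pre_cumulative_delay; infer_instance

def pvWitness_cumulative_delay : List Int × List (List Int) × List Int := ([1, 2], [[2, 3], [1, 4]], [5, 9])

def Spec_cumulative_delay (schedule : List Int) (tasks : List (List Int)) (due_dates : List Int) (out : Int) : Prop := out = cumulative_delay_alt schedule tasks due_dates
instance (schedule : List Int) (tasks : List (List Int)) (due_dates : List Int) (out : Int) : Decidable (Spec_cumulative_delay schedule tasks due_dates out) := by unfold Spec_cumulative_delay; infer_instance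

-- ===== CLAIM (what is proved, stated in full; the proofs are below) =====
def Claim_equal_cumulative_delay : Prop := ∀ (schedule : List Int) (tasks : List (List Int)) (due_dates : List Int), Dom_cumulative_delay schedule tasks due_dates → Pre_cumulative_delay schedule tasks due_dates → Spec_cumulative_delay schedule tasks due_dates (cumulative_delay schedule tasks due_dates)

-- ===== LEMMAS AND PROOFS =====

-- the completion-time table both programs fill, as a recursive function of (job index, machine index)
def pvCf (rows : List (List Int)) : Nat → Nat → Int
  | 0, 0 => max 0 0 + (rows.getD 0 []).getD 0 0
  | 0, j+1 => max (pvCf rows 0 j) 0 + (rows.getD 0 []).getD (j+1) 0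
  | r+1, 0 => max 0 (pvCf rows r 0) + (rows.getD (r+1) []).getD 0 0
  | r+1, j+1 => max (pvCf rows (r+1) j) (pvCf rows r (j+1)) + (rows.getD (r+1) []).getD (j+1) 0

theorem pvCf_eq (rows : List (List Int)) (r j : Nat) :
    pvCf rows r j = max (if j = 0 then 0 else pvCf rows r (j-1)) (if r = 0 then 0 else pvCf rows (r-1) j)
      + (rows.getD r []).getD j 0 := by
  match r, j with
  | 0, 0 => simp [pvCf]
  | 0, j+1 => simp [pvCf, max_comm]
  | r+1, 0 => simp [pvCf]
  | r+1, j+1 => simp [pvCf]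

-- running maximum over machines 0..j of job r's completion times
def pvBst (rows : List (List Int)) (r : Nat) : Nat → Int
  | 0 => pvCf rows r 0
  | j+1 => max (pvBst rows r j) (pvCf rows r (j+1))

theorem pvMapRangeGetD (f : Nat → Int) (n k : Nat) (h : k < n) :
    ((List.range n).map f).getD k 0 = f k := by
  rw [List.getD_eq_getElem?_getD]
  simp [h]

-- ---------- A side ----------
def pvAltRow (prev : List Int) (trow : List Int) (nm : Nat) : List Int :=
  (List.range nm).foldl
    (fun row j => row ++ [max (prev.getD j 0) (if 0 < j then row.getD (j-1) 0 else 0) + trow.getD j 0])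
    []

theorem pvAltRow_length (prev trow : List Int) (nm : Nat) : (pvAltRow prev trow nm).length = nm := by
  unfold pvAltRow
  induction nm with
  | zero => simp
  | succ n ih =>
    rw [List.range_succ, List.foldl_append]
    simp only [List.foldl_cons, List.foldl_nil, List.length_append, List.length_cons, List.length_nil, ih]

-- A's in-place inner loop equals the left-to-right row builder, as long as the rolling array is long enough.
theorem pvInner_eq (trow : List Int) : ∀ (n : Nat) (m : List Int), n ≤ m.length →
    (List.range n).foldl
      (fun acc j => acc.set j (max (acc.getD j 0) (if 0 < j then acc.getD (j-1) 0 else 0) + trow.getD j 0)) m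
    = (List.range n).foldl
        (fun row j => row ++ [max (m.getD j 0) (if 0 < j then row.getD (j-1) 0 else 0) + trow.getD j 0]) []
      ++ m.drop n := by
  intro n
  induction n with
  | zero => intro m h; simp
  | succ n ih =>
    intro m h
    have hlt : n < m.length := by omega
    rw [List.range_succ, List.foldl_append, List.foldl_append]
    rw [ih m (by omega)]
    simp only [List.foldl_cons, List.foldl_nil]
    have hP : ((List.range n).foldl (fun row j => row ++ [max (m.getD j 0) (if 0 < j then row.getD (j-1) 0 else 0) + trow.getD j 0]) ([] : List Int)).length = n := pvAltRow_length m trow n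
    generalize hg : (List.range n).foldl (fun row j => row ++ [max (m.getD j 0) (if 0 < j then row.getD (j-1) 0 else 0) + trow.getD j 0]) ([] : List Int) = P at hP ⊢
    have e1 : (P ++ m.drop n).getD n 0 = m.getD n 0 := by
      rw [List.getD_append_right P (m.drop n) 0 n (by omega), hP, Nat.sub_self]
      simp [List.getD_eq_getElem?_getD, List.getElem?_drop]
    have e2 : 0 < n → (P ++ m.drop n).getD (n-1) 0 = P.getD (n-1) 0 := by
      intro h0
      rw [List.getD_append P (m.drop n) 0 (n-1) (by omega)]
    have e3 : ∀ v : Int, (P ++ m.drop n).set n v = (P ++ [v]) ++ m.drop (n+1) := by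
      intro v
      rw [List.set_append]
      rw [if_neg (by omega), hP, Nat.sub_self]
      rw [List.drop_eq_getElem_cons hlt, List.set_cons_zero]
      simp
    rw [e1]
    by_cases h0 : 0 < n
    · rw [if_pos h0, if_pos h0, e2 h0, e3]
    · rw [if_neg h0, if_neg h0, e3]

theorem pvInner_eq_row (trow : List Int) (m : List Int) (nm : Nat) (h : m.length = nm) :
    (List.range nm).foldl
      (fun acc j => acc.set j (max (acc.getD j 0) (if 0 < j then acc.getD (j-1) 0 else 0) + trow.getD j 0)) m
    = pvAltRow m trow nm := by
  subst h
  have := pvInner_eq trow m.length m le_rfl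
  simpa [pvAltRow] using this

-- proof-local: A's per-job tardiness recursion over the remaining schedule, carrying the previous row
def pvRowF (tasks : List (List Int)) (nm : Nat) (m : List Int) (i : Int) : List Int :=
  pvAltRow m ((PySem.List.pyGet? tasks (i-1)).getD []) nm

def pvTard (tasks : List (List Int)) (due_dates : List Int) (nm : Nat) : List Int → List Int → Int
  | [], _ => 0
  | i :: s, m =>
    max 0 ((PySem.List.max? (pvRowF tasks nm m i) (fun x => x)).getD 0 - (PySem.List.pyGet? due_dates (i-1)).getD 0)
      + pvTard tasks due_dates nm s (pvRowF tasks nm m i)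

theorem pvZipMapSelf (l : List Int) (f : Int → Int) :
    l.zip (l.map f) = l.map (fun i => (i, f i)) := by
  induction l with
  | nil => rfl
  | cons a l ih => simp [ih]

theorem pvAfold_eq (tasks : List (List Int)) (due_dates : List Int) (nm : Nat) :
    ∀ (s : List Int) (m ds : List Int), m.length = nm →
      ((s.map (fun i => (i, (PySem.List.pyGet? due_dates (i-1)).getD 0))).foldl
        (fun (st : List Int × List Int) p =>
          ((List.range nm).foldl
            (fun acc j => acc.set j (max (acc.getD j 0) (if 0 < j then acc.getD (j-1) 0 else 0)
                          + (((PySem.List.pyGet? tasks (p.1-1)).getD []).getD j 0))) st.1,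
           st.2 ++ [max 0 ((PySem.List.max? ((List.range nm).foldl
            (fun acc j => acc.set j (max (acc.getD j 0) (if 0 < j then acc.getD (j-1) 0 else 0)
                          + (((PySem.List.pyGet? tasks (p.1-1)).getD []).getD j 0))) st.1) (fun x => x)).getD 0 - p.2)]))
        (m, ds)).2.sum
      = ds.sum + pvTard tasks due_dates nm s m := by
  intro s
  induction s with
  | nil => intro m ds _; simp [pvTard]
  | cons i s ih =>
    intro m ds hlen
    simp only [List.map_cons, List.foldl_cons]
    rw [pvInner_eq_row ((PySem.List.pyGet? tasks (i-1)).getD []) m nm hlen]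
    rw [ih (pvAltRow m ((PySem.List.pyGet? tasks (i-1)).getD []) nm) _ (pvAltRow_length _ _ _)]
    simp only [pvTard, pvRowF, List.sum_append, List.sum_cons, List.sum_nil]
    ring

-- the row builder produces row r of the table
theorem pvAltRow_spec (rows : List (List Int)) (r : Nat) : ∀ (nm : Nat) (prev : List Int),
    (∀ j, j < nm → prev.getD j 0 = if r = 0 then 0 else pvCf rows (r-1) j) →
    pvAltRow prev (rows.getD r []) nm = (List.range nm).map (pvCf rows r) := by
  intro nm
  induction nm with
  | zero => intro prev _; simp [pvAltRow]
  | succ n ih =>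
    intro prev h
    have hstep : pvAltRow prev (rows.getD r []) (n+1)
        = pvAltRow prev (rows.getD r []) n
          ++ [max (prev.getD n 0) (if 0 < n then (pvAltRow prev (rows.getD r []) n).getD (n-1) 0 else 0)
              + (rows.getD r []).getD n 0] := by
      unfold pvAltRow
      rw [List.range_succ, List.foldl_append]
      simp
    rw [hstep, ih prev (fun j hj => h j (by omega))]
    rw [List.range_succ, List.map_append, List.map_cons, List.map_nil]
    congr 1
    congr 1
    rw [pvCf_eq rows r n, h n (by omega), max_comm]
    congr 1
    by_cases h0 : 0 < n
    · rw [if_pos h0, pvMapRangeGetD _ n (n-1) (by omega), if_neg (show ¬ n = 0 by omega)]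
    · rw [if_neg h0, if_pos (show n = 0 by omega)]

-- generic per-job tardiness sum, parametrised by the per-job completion value G
def pvTardG (due_dates : List Int) (G : Nat → Int) : List Int → Nat → Int
  | [], _ => 0
  | i :: s, r => max 0 (G r - (PySem.List.pyGet? due_dates (i-1)).getD 0) + pvTardG due_dates G s (r+1)

theorem pvTardG_congr (due_dates : List Int) (G1 G2 : Nat → Int) (hG : ∀ r, G1 r = G2 r) :
    ∀ (s : List Int) (r : Nat), pvTardG due_dates G1 s r = pvTardG due_dates G2 s r := by
  intro s
  induction s with
  | nil => intro r; rfl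
  | cons i s ih => intro r; simp only [pvTardG, hG, ih]

-- value of max(row r) in A: the maximum entry of table row r
def pvMval (rows : List (List Int)) (nm : Nat) (r : Nat) : Int :=
  (PySem.List.max? ((List.range nm).map (pvCf rows r)) (fun x => x)).getD 0

theorem pvTardA (tasks : List (List Int)) (due_dates : List Int) (nm : Nat) (schedule : List Int) :
    ∀ (s : List Int) (r : Nat) (m : List Int), schedule.drop r = s →
      (∀ j, j < nm → m.getD j 0 = if r = 0 then 0
          else pvCf (schedule.map (fun i => (PySem.List.pyGet? tasks (i-1)).getD [])) (r-1) j) →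
      pvTard tasks due_dates nm s m
      = pvTardG due_dates (pvMval (schedule.map (fun i => (PySem.List.pyGet? tasks (i-1)).getD [])) nm) s r := by
  intro s
  induction s with
  | nil => intro r m _ _; rfl
  | cons i s ih =>
    intro r m hdrop hm
    have hklt : r < schedule.length := by
      by_contra hge
      rw [List.drop_eq_nil_iff.mpr (by omega)] at hdrop
      simp at hdrop
    have hgi : schedule[r]? = some i := by
      have h1 : schedule[r]? = (schedule.drop r)[0]? := by simp [List.getElem?_drop]
      rw [h1, hdrop]; rfl
    have hrow : (schedule.map (fun i => (PySem.List.pyGet? tasks (i-1)).getD [])).getD r []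
        = (PySem.List.pyGet? tasks (i-1)).getD [] := by
      rw [List.getD_eq_getElem?_getD, List.getElem?_map, hgi]
      rfl
    have hR : pvRowF tasks nm m i
        = (List.range nm).map (pvCf (schedule.map (fun i => (PySem.List.pyGet? tasks (i-1)).getD [])) r) := by
      unfold pvRowF
      rw [← hrow]
      exact pvAltRow_spec _ r nm m hm
    have hdrop' : schedule.drop (r+1) = s := by
      have h1 : schedule.drop (r+1) = (schedule.drop r).drop 1 := by rw [List.drop_drop]
      rw [h1, hdrop]; rfl
    have hm' : ∀ j, j < nm → (pvRowF tasks nm m i).getD j 0 = if r+1 = 0 then 0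
        else pvCf (schedule.map (fun i => (PySem.List.pyGet? tasks (i-1)).getD [])) (r+1-1) j := by
      intro j hj
      rw [hR, pvMapRangeGetD _ nm j hj]
      simp
    simp only [pvTard, pvTardG]
    rw [ih (r+1) (pvRowF tasks nm m i) hdrop' hm', hR]
    rfl

-- ---------- B side ----------
theorem pvColStep_aux (rows : List (List Int)) (col : List Int) (j : Nat)
    (hcol : ∀ r, r < rows.length → 0 < j → col.getD r 0 = pvCf rows r (j-1)) :
    ∀ (rs : List (List Int)) (k : Nat), rows.drop k = rs → k ≤ rows.length →
      (rs.foldl (fun (p : List Int × Int) trow =>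
          let c := max (if 0 < j then col.getD p.1.length 0 else 0) p.2 + trow.getD j 0
          (p.1 ++ [c], c))
        ((List.range k).map (fun r => pvCf rows r j), if k = 0 then 0 else pvCf rows (k-1) j)).1
      = (List.range rows.length).map (fun r => pvCf rows r j) := by
  intro rs
  induction rs with
  | nil =>
    intro k hdrop hk
    have hge : rows.length ≤ k := by
      by_contra hlt
      have h2 := List.drop_eq_nil_iff.mp hdrop
      omega
    have hkeq : k = rows.length := by omega
    subst hkeq
    rfl
  | cons trow rs ih =>
    intro k hdrop hk
    have hklt : k < rows.length := by
      by_contra hge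
      rw [List.drop_eq_nil_iff.mpr (by omega)] at hdrop
      simp at hdrop
    have hget : rows.getD k [] = trow := by
      rw [List.getD_eq_getElem?_getD]
      have h1 : rows[k]? = (rows.drop k)[0]? := by simp [List.getElem?_drop]
      rw [h1, hdrop]; rfl
    have hlen : ((List.range k).map (fun r => pvCf rows r j)).length = k := by simp
    have hc : max (if 0 < j then col.getD k 0 else 0)
        (if k = 0 then 0 else pvCf rows (k-1) j) + trow.getD j 0 = pvCf rows k j := by
      rw [pvCf_eq rows k j, hget]
      congr 2
      by_cases h0 : 0 < j
      · rw [if_pos h0, if_neg (by omega), hcol k hklt h0]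
      · rw [if_neg h0, if_pos (by omega)]
    have hdrop' : rows.drop (k+1) = rs := by
      have h1 : rows.drop (k+1) = (rows.drop k).drop 1 := by rw [List.drop_drop]
      rw [h1, hdrop]; rfl
    simp only [List.foldl_cons, hlen, hc]
    have hacc : (List.range k).map (fun r => pvCf rows r j) ++ [pvCf rows k j]
        = (List.range (k+1)).map (fun r => pvCf rows r j) := by
      rw [List.range_succ, List.map_append, List.map_cons, List.map_nil]
    rw [hacc]
    have hprev : pvCf rows k j = if k+1 = 0 then 0 else pvCf rows (k+1-1) j := by simp
    rw [hprev]
    exact ih (k+1) hdrop' (by omega)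

theorem pvColStep_spec (rows : List (List Int)) (col : List Int) (j : Nat)
    (hcol : ∀ r, r < rows.length → 0 < j → col.getD r 0 = pvCf rows r (j-1)) :
    pvColStep rows col j = (List.range rows.length).map (fun r => pvCf rows r j) := by
  unfold pvColStep
  have := pvColStep_aux rows col j hcol rows 0 rfl (by omega)
  simpa using this

theorem pvZipWithMax (l : List Nat) (f g : Nat → Int) :
    List.zipWith max (l.map f) (l.map g) = l.map (fun r => max (f r) (g r)) := by
  induction l with
  | nil => rfl
  | cons a l ih => simp [ih]

theorem pvColFold (rows : List (List Int)) : ∀ (k : Nat),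
    (List.range k).foldl (fun (st : List Int × List Int) j =>
        let newcol := pvColStep rows st.1 j
        (newcol, if j = 0 then newcol else st.2.zipWith max newcol)) ([], [])
    = (if k = 0 then (([], []) : List Int × List Int)
       else ((List.range rows.length).map (fun r => pvCf rows r (k-1)),
             (List.range rows.length).map (fun r => pvBst rows r (k-1)))) := by
  intro k
  induction k with
  | zero => rfl
  | succ k ih =>
    rw [List.range_succ, List.foldl_append, ih]
    simp only [List.foldl_cons, List.foldl_nil]
    by_cases hk : k = 0
    · subst hk
      have hcs : pvColStep rows [] 0 = (List.range rows.length).map (fun r => pvCf rows r 0) :=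
        pvColStep_spec rows [] 0 (fun r _ h0 => absurd h0 (by omega))
      simp [hcs, pvBst]
    · rw [if_neg hk, if_neg (show ¬ (k+1 = 0) by omega)]
      simp only
      have hcol : ∀ r, r < rows.length → 0 < k →
          (((List.range rows.length).map (fun r => pvCf rows r (k-1))).getD r 0) = pvCf rows r (k-1) :=
        fun r hr _ => pvMapRangeGetD _ _ r hr
      have hcs : pvColStep rows ((List.range rows.length).map (fun r => pvCf rows r (k-1))) k
          = (List.range rows.length).map (fun r => pvCf rows r k) :=
        pvColStep_spec rows _ k (fun r hr h0 => pvMapRangeGetD _ _ r hr)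
      rw [hcs, if_neg hk, pvZipWithMax]
      have hbst : (fun r => max (pvBst rows r (k-1)) (pvCf rows r k)) = (fun r => pvBst rows r (k+1-1)) := by
        funext r
        have hk1 : k = (k-1) + 1 := by omega
        rw [hk1]
        simp [pvBst]
      rw [hbst]
      simp

-- A's max(row) equals B's running maximum over machines
theorem pvFoldlBst (rows : List (List Int)) (r : Nat) : ∀ (n : Nat),
    ((List.range n).map (fun k => pvCf rows r (k+1))).foldl max (pvCf rows r 0) = pvBst rows r n := by
  intro n
  induction n with
  | zero => rfl
  | succ n ih =>
    rw [List.range_succ, List.map_append, List.foldl_append, ih]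
    rfl

theorem pvMaxRow (rows : List (List Int)) (r : Nat) (n : Nat) :
    pvMval rows (n+1) r = pvBst rows r n := by
  unfold pvMval
  rw [List.range_succ_eq_map, List.map_cons, PySem.List.max?_id_cons]
  rw [List.map_map]
  have : ((List.range n).map (fun k => (fun r' => pvCf rows r r') ∘ Nat.succ <| k))
      = (List.range n).map (fun k => pvCf rows r (k+1)) := by
    simp [Function.comp]
  simp only [Function.comp] at *
  rw [Option.getD_some]
  exact pvFoldlBst rows r n

-- B's final fold over zip(best, schedule) is the generic tardiness sum
theorem pvZipFold (due_dates : List Int) (G : Nat → Int) :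
    ∀ (s : List Int) (r : Nat) (t0 : Int),
      ((((List.range s.length).map (fun k => G (r+k))).zip s).foldl
        (fun t p => t + max 0 (p.1 - (PySem.List.pyGet? due_dates (p.2-1)).getD 0)) t0)
      = t0 + pvTardG due_dates G s r := by
  intro s
  induction s with
  | nil => intro r t0; simp [pvTardG]
  | cons i s ih =>
    intro r t0
    have hmap : (List.range (i :: s).length).map (fun k => G (r+k))
        = G r :: (List.range s.length).map (fun k => G ((r+1)+k)) := by
      rw [List.length_cons, List.range_succ_eq_map, List.map_cons, List.map_map]
      have h1 : ((fun k => G (r+k)) ∘ Nat.succ) = fun k => G ((r+1)+k) := by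
        funext k
        show G (r + (k+1)) = G (r+1+k)
        congr 1
        omega
      rw [h1]
      simp
    rw [hmap]
    simp only [List.zip_cons_cons, List.foldl_cons]
    rw [ih (r+1)]
    simp only [pvTardG]
    ring

-- ===== VERDICT (by name: the statement is the Claim_ definition above) =====
theorem cumulative_delay_spec : Claim_equal_cumulative_delay := by
  intro schedule tasks due_dates _ hpre
  unfold Spec_cumulative_delay
  by_cases hs : schedule = []
  · subst hs
    simp [cumulative_delay, cumulative_delay_alt]
  · obtain ⟨-, hnm, -⟩ := hpre
    obtain ⟨n, hn⟩ : ∃ n, ((PySem.List.pyGet? tasks 0).getD []).length = n + 1 := by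
      have := hnm hs
      exact ⟨((PySem.List.pyGet? tasks 0).getD []).length - 1, by omega⟩
    simp only [cumulative_delay, cumulative_delay_alt, hn]
    -- A side
    rw [pvZipMapSelf schedule (fun i => (PySem.List.pyGet? due_dates (i-1)).getD 0)]
    rw [pvAfold_eq tasks due_dates (n+1) schedule (List.replicate (n+1) 0) [] (by simp)]
    rw [pvTardA tasks due_dates (n+1) schedule schedule 0 (List.replicate (n+1) 0) (by simp)
          (by intro j hj; simp)]
    -- B side
    rw [pvColFold (schedule.map (fun i => (PySem.List.pyGet? tasks (i-1)).getD [])) (n+1)]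
    rw [if_neg (by omega : ¬ (n+1 = 0))]
    simp only [Nat.add_sub_cancel, List.length_map]
    have hGmap : (List.range schedule.length).map
          (fun r => pvBst (schedule.map (fun i => (PySem.List.pyGet? tasks (i-1)).getD [])) r n)
        = (List.range schedule.length).map
          (fun k => pvBst (schedule.map (fun i => (PySem.List.pyGet? tasks (i-1)).getD [])) (0+k) n) := by
      simp
    rw [hGmap]
    have hlen : schedule.length = (schedule).length := rfl
    rw [pvZipFold due_dates
          (fun r => pvBst (schedule.map (fun i => (PySem.List.pyGet? tasks (i-1)).getD [])) r n)
          schedule 0 0]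
    rw [List.sum_nil, zero_add, zero_add]
    exact pvTardG_congr due_dates _ _
      (fun r => pvMaxRow (schedule.map (fun i => (PySem.List.pyGet? tasks (i-1)).getD [])) r n)
      schedule 0
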